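-- pv_equiv track=rewrite | github.com/eugenioservidiome/estrazione_dati_comune | src/comune_extractor/llm_extract.py | select_chunks
-- ===== SOURCE A (Python) =====
-- from typing import Optional, Dict, List, Any
--
-- def select_chunks(text: str, keywords: List[str], year: int,
--                  max_chunks: int = 3, chunk_size: int = 2000) -> List[str]:
--     """
--     Select relevant chunks from text for LLM processing.
--     Find positions with year + keywords, extract surrounding context.
--     """
--     chunks = []
--     text_lower = text.lower()
--     year_str = str(year)
--
--     # Find positions with year
--     year_positions = []
--     pos = 0
--     while True:
--         pos = text_lower.find(year_str, pos)
--         if pos == -1: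
--             break
--         year_positions.append(pos)
--         pos += len(year_str)
--
--     # For each year position, check if keywords nearby
--     scored_positions = []
--     for y_pos in year_positions:
--         start = max(0, y_pos - 500)
--         end = min(len(text), y_pos + 500)
--         context = text_lower[start:end]
--
--         # Count keyword matches
--         score = sum(1 for kw in keywords if kw.lower() in context)
--         if score > 0:
--             scored_positions.append((y_pos, score))
--
--     # Sort by score and take top positions
--     scored_positions.sort(key=lambda x: x[1], reverse=True)
--
--     for pos, score in scored_positions[:max_chunks]:
--         start = max(0, pos - chunk_size // 2)
--         end = min(len(text), pos + chunk_size // 2)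
--         chunk = text[start:end]
--         chunks.append(chunk)
--
--     return chunks
-- ===== SOURCE B (Python) =====
-- from typing import List
--
-- def select_chunks(text: str, keywords: List[str], year: int,
--                   max_chunks: int = 3, chunk_size: int = 2000) -> List[str]:
--     """
--     Same selection, but instead of re-scanning a 1000-char window per
--     (position, keyword) pair, precompute each keyword's occurrence
--     positions once and sweep them over the (ascending) year positions
--     with a moving pointer.
--     """
--     text_lower = text.lower()
--     year_str = str(year)
--     n = len(text)
--
--     # ascending, non-overlapping year positions (same scan rule as a find loop)
--     year_positions = []
--     p = text_lower.find(year_str)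
--     while p != -1:
--         year_positions.append(p)
--         p = text_lower.find(year_str, p + len(year_str))
--
--     if not year_positions:
--         return []
--
--     # accumulate per-position scores keyword by keyword
--     scored = [(y, 0) for y in year_positions]
--     for kw in keywords:
--         k = kw.lower()
--         if not k:
--             # the empty string occurs in every context
--             scored = [(y, s + 1) for y, s in scored]
--             continue
--         if len(k) > 1000:
--             # longer than any 1000-char context window: can never fit
--             continue
--         # all (possibly overlapping) occurrence positions of k, ascending
--         occ = []
--         q = text_lower.find(k)
--         while q != -1:
--             occ.append(q)
--             q = text_lower.find(k, q + 1)
--         # moving pointer: window starts are nondecreasing in y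
--         j = 0
--         new_scored = []
--         for y, s in scored:
--             start = max(0, y - 500)
--             while j < len(occ) and occ[j] < start:
--                 j += 1
--             if j < len(occ) and occ[j] + len(k) <= min(n, y + 500):
--                 new_scored.append((y, s + 1))
--             else:
--                 new_scored.append((y, s))
--         scored = new_scored
--
--     scored = [(y, s) for y, s in scored if s > 0]
--     scored.sort(key=lambda t: t[1], reverse=True)
--
--     return [text[max(0, y - chunk_size // 2):min(n, y + chunk_size // 2)]
--             for y, s in scored[:max_chunks]]
-- ===== Notes on version B (the rewrite author's own statement) =====
-- stated objective: alternative
-- what changed: Instead of slicing a 1000-char lowercase context window and substring-testing every keyword at every year position (A), B precomputes each keyword's occurrence-position list once with a find loop and sweeps it over the ascending year positions with a moving pointer, so no per-position window text is built or scanned.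
import Mathlib
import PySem

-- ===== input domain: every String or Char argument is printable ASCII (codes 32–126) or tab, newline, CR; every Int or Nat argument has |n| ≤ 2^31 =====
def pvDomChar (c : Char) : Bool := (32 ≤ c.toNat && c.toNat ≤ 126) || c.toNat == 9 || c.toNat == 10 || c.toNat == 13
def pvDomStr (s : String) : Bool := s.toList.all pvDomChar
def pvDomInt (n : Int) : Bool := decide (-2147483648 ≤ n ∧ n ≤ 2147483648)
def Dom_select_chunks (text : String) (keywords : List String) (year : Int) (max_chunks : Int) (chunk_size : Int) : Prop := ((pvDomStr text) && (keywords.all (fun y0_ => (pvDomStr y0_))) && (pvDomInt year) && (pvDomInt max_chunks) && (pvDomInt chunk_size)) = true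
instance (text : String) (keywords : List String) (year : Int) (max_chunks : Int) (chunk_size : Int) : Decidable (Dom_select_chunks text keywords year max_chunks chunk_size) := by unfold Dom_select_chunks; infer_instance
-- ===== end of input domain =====

-- B replaces A's per-(year-position, keyword) 1000-char window scan by per-keyword
-- occurrence lists swept once over the ascending year positions with a moving pointer
-- (objective: alternative algorithm; return value proved identical on the whole domain).

-- ===== PORT A =====
-- the `while True: pos = text_lower.find(year_str, pos) …` loop (fuel = enough iterations)
def pvYearLoopA (tl ys : List Char) : Nat → Int → List Int
  | 0, _ => []
  | fuel+1, pos =>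
      let p := PySem.Chars.findFrom tl ys pos none
      if p = -1 then [] else p :: pvYearLoopA tl ys fuel (p + (ys.length : Int))

def select_chunks (text : String) (keywords : List String) (year : Int) (max_chunks : Int) (chunk_size : Int) : List String :=
  let tl := PySem.Chars.lower text.toList
  let ys := PySem.Int.toChars year
  let yps := pvYearLoopA tl ys (tl.length + 1) 0
  let scored := yps.foldl (fun acc y =>
    let start := max 0 (y - 500)
    let stop := min (PySem.Str.len text) (y + 500)
    let context := PySem.List.slice tl (some start) (some stop)
    let score := keywords.foldl (fun s kw => if PySem.Chars.isIn (PySem.Chars.lower kw.toList) context then s + 1 else s) (0 : Int)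
    if 0 < score then acc ++ [(y, score)] else acc) ([] : List (Int × Int))
  let scoredS := PySem.List.sorted scored (fun x => x.2) true
  (PySem.List.slice scoredS none (some max_chunks)).foldl (fun chunks p =>
    let start := max 0 (p.1 - PySem.Int.floordiv chunk_size 2)
    let stop := min (PySem.Str.len text) (p.1 + PySem.Int.floordiv chunk_size 2)
    chunks ++ [String.ofList (PySem.List.slice text.toList (some start) (some stop))]) []

-- ===== PORT B =====
-- `p = find(pat); while p != -1: append p; p = find(pat, p + step)` (year scan: step = len(pat); occurrence scan: step = 1)
def pvScanB (tl pat : List Char) (step : Int) : Nat → Int → List Int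
  | 0, _ => []
  | fuel+1, p =>
      if p = -1 then [] else p :: pvScanB tl pat step fuel (PySem.Chars.findFrom tl pat (p + step) none)

-- `while j < len(occ) and occ[j] < start: j += 1`
def pvAdvanceB (occ : List Int) (start : Int) : Nat → Nat → Nat
  | 0, j => j
  | fuel+1, j => if j < occ.length ∧ occ.getD j 0 < start then pvAdvanceB occ start fuel (j+1) else j

-- `for y, s in scored: … new.append((y, s+1) or (y, s))` with the moving pointer j
def pvSweepB (occ : List Int) (klen n : Int) : Nat → List (Int × Int) → List (Int × Int)
  | _, [] => []
  | j, yz :: rest =>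
      let start := max 0 (yz.1 - 500)
      let j' := pvAdvanceB occ start occ.length j
      (if j' < occ.length ∧ occ.getD j' 0 + klen ≤ min n (yz.1 + 500) then (yz.1, yz.2 + 1) else (yz.1, yz.2)) :: pvSweepB occ klen n j' rest

def select_chunks_alt (text : String) (keywords : List String) (year : Int) (max_chunks : Int) (chunk_size : Int) : List String :=
  let tl := PySem.Chars.lower text.toList
  let ys := PySem.Int.toChars year
  let n := PySem.Str.len text
  let yps := pvScanB tl ys (ys.length : Int) (tl.length + 1) (PySem.Chars.findFrom tl ys 0 none)
  if yps = [] then []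
  else
    let scored := keywords.foldl (fun sc kw =>
      let k := PySem.Chars.lower kw.toList
      if k = [] then sc.map (fun p => (p.1, p.2 + 1))
      else if 1000 < k.length then sc
      else
        let occ := pvScanB tl k 1 (tl.length + 1) (PySem.Chars.findFrom tl k 0 none)
        pvSweepB occ (k.length : Int) n 0 sc) (yps.map (fun y => (y, (0 : Int))))
    let scoredF := scored.filter (fun p => 0 < p.2)
    let scoredS := PySem.List.sorted scoredF (fun t => t.2) true
    (PySem.List.slice scoredS none (some max_chunks)).map (fun p =>
      String.ofList (PySem.List.slice text.toList (some (max 0 (p.1 - PySem.Int.floordiv chunk_size 2))) (some (min n (p.1 + PySem.Int.floordiv chunk_size 2)))))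

-- ===== PRECONDITION & SPEC =====
def Spec_select_chunks (text : String) (keywords : List String) (year : Int) (max_chunks : Int) (chunk_size : Int) (out : List String) : Prop := out = select_chunks_alt text keywords year max_chunks chunk_size
instance (text : String) (keywords : List String) (year : Int) (max_chunks : Int) (chunk_size : Int) (out : List String) : Decidable (Spec_select_chunks text keywords year max_chunks chunk_size out) := by unfold Spec_select_chunks; infer_instance

-- ===== CLAIM (what is proved, stated in full; the proofs are below) =====
def Claim_equal_select_chunks : Prop := ∀ (text : String) (keywords : List String) (year : Int) (max_chunks : Int) (chunk_size : Int), Dom_select_chunks text keywords year max_chunks chunk_size → Spec_select_chunks text keywords year max_chunks chunk_size (select_chunks text keywords year max_chunks chunk_size)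


-- ===== LEMMAS AND PROOFS =====

-- A's year-find loop and B's (find-before-loop) scan compute the same list
theorem pvYearAB (tl ys : List Char) : ∀ (fuel : Nat) (pos : Int),
    pvYearLoopA tl ys fuel pos = pvScanB tl ys (ys.length : Int) fuel (PySem.Chars.findFrom tl ys pos none) := by
  intro fuel
  induction fuel with
  | zero => intro pos; rfl
  | succ f ih =>
      intro pos
      simp only [pvYearLoopA, pvScanB]
      split <;> simp_all

-- a nonempty prefix of a drop fits inside the list
theorem pvPrefixDropLen {k l : List Char} {q : Nat} (hpre : k <+: l.drop q) (hk : k ≠ []) :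
    q + k.length ≤ l.length := by
  have h1 := hpre.length_le
  have h2 : 0 < k.length := List.length_pos_of_ne_nil hk
  simp only [List.length_drop] at h1
  omega

-- the scan loop returns exactly the match positions ≥ pos, in ascending order
theorem pvScanSpec (tl pat : List Char) (hpat : pat ≠ []) (step : Int)
    (h1 : 1 ≤ step) (hs : step ≤ (pat.length : Int)) :
    ∀ (fuel : Nat) (pos : Nat), pos ≤ tl.length → tl.length + 1 - pos ≤ fuel →
    (∀ p ∈ pvScanB tl pat step fuel (PySem.Chars.findFrom tl pat (pos : Int) none),
        (pos : Int) ≤ p ∧ 0 ≤ p ∧ pat <+: tl.drop p.toNat) ∧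
    (pvScanB tl pat step fuel (PySem.Chars.findFrom tl pat (pos : Int) none)).Pairwise (· < ·) ∧
    (step = 1 → ∀ q : Nat, pos ≤ q → pat <+: tl.drop q →
        (q : Int) ∈ pvScanB tl pat step fuel (PySem.Chars.findFrom tl pat (pos : Int) none)) := by
  intro fuel
  induction fuel with
  | zero => intro pos hpos hf; omega
  | succ f ih =>
      intro pos hpos hf
      by_cases hneg : PySem.Chars.findFrom tl pat (pos : Int) none = -1
      · simp only [pvScanB, hneg]
        refine ⟨by simp, by simp, ?_⟩
        intro _ q hq hpre
        exfalso
        have hinf : pat <:+: tl.drop pos := by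
          have h2 : pat <+: (tl.drop pos).drop (q - pos) := by
            rw [List.drop_drop]
            have : pos + (q - pos) = q := by omega
            rw [this]; exact hpre
          exact h2.isInfix.trans (List.drop_suffix _ _).isInfix
        exact (PySem.Chars.findFrom_natCast_eq_neg_one_iff tl pat pos hpos).mp hneg hinf
      · set p := PySem.Chars.findFrom tl pat (pos : Int) none with hp
        obtain ⟨hple, hppre, hpmin⟩ := PySem.Chars.findFrom_natCast_spec tl pat pos hpos hneg
        have hp0 : (0 : Int) ≤ p := le_trans (by omega) hple
        have hlen : p.toNat + pat.length ≤ tl.length := pvPrefixDropLen hppre hpat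
        have hstepcast : p + step = ((p.toNat + step.toNat : Nat) : Int) := by push_cast; omega
        have hpos2 : p.toNat + step.toNat ≤ tl.length := by omega
        have hf2 : tl.length + 1 - (p.toNat + step.toNat) ≤ f := by
          have : pos ≤ p.toNat := by omega
          omega
        obtain ⟨ihs, ihp, ihc⟩ := ih (p.toNat + step.toNat) hpos2 hf2
        rw [← hstepcast] at ihs ihp ihc
        simp only [pvScanB, hneg]
        refine ⟨?_, ?_, ?_⟩
        · intro x hx
          rcases List.mem_cons.mp hx with rfl | hx
          · exact ⟨hple, hp0, hppre⟩
          · obtain ⟨hx1, hx2, hx3⟩ := ihs x hx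
            exact ⟨by omega, hx2, hx3⟩
        · refine List.pairwise_cons.mpr ⟨?_, ihp⟩
          intro x hx
          have := (ihs x hx).1
          push_cast at this; omega
        · intro hstep1 q hq hpre
          by_cases hqp : (q : Int) = p
          · rw [← hqp]; exact List.mem_cons_self ..
          · have hqgt : p.toNat + step.toNat ≤ q := by
              have hnotlt : ¬ q < p.toNat := fun hlt => hpmin q hq hlt hpre
              have : q ≠ p.toNat := by
                intro h; apply hqp; rw [h]; omega
              omega
            exact List.mem_cons_of_mem _ (ihc hstep1 q hqgt hpre)

-- substring of a take, positionally
theorem pvInfixTake (k l : List Char) (m : Nat) :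
    k <:+: l.take m ↔ ∃ q : Nat, q + k.length ≤ m ∧ k <+: l.drop q := by
  constructor
  · intro h
    rcases List.infix_iff_prefix_suffix.mp h with ⟨t, hpre, hsuf⟩
    have ht := List.suffix_iff_eq_drop.mp hsuf
    set j := (l.take m).length - t.length with hj
    rw [ht, List.drop_take] at hpre
    have h2 := List.prefix_take_iff.mp hpre
    have hjm : j ≤ m := by
      have := List.length_take_le m l
      omega
    exact ⟨j, by omega, h2.1⟩
  · rintro ⟨q, hqm, hpre⟩
    have h1 : k <+: (l.take m).drop q := by
      rw [List.drop_take]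
      exact List.prefix_take_iff.mpr ⟨hpre, by omega⟩
    exact (h1.isInfix).trans (List.drop_suffix q (l.take m)).isInfix

-- `k in tl[start:stop]`, positionally (nonempty k, nonnegative bounds)
theorem pvIsInSlice (k tl : List Char) (start stop : Int) (hk : k ≠ [])
    (h0 : 0 ≤ start) (h1 : 0 ≤ stop) :
    PySem.Chars.isIn k (PySem.List.slice tl (some start) (some stop)) = true ↔
      ∃ q : Nat, start ≤ (q : Int) ∧ (q : Int) + (k.length : Int) ≤ stop ∧ k <+: tl.drop q := by
  have hkl : 0 < k.length := List.length_pos_of_ne_nil hk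
  rw [PySem.Chars.isIn_iff_infix, PySem.List.slice_toNat tl h0 h1, pvInfixTake]
  constructor
  · rintro ⟨q, hq, hpre⟩
    rw [List.drop_drop] at hpre
    exact ⟨start.toNat + q, by omega, by push_cast; omega, hpre⟩
  · rintro ⟨q, hq1, hq2, hpre⟩
    refine ⟨q - start.toNat, by omega, ?_⟩
    rw [List.drop_drop]
    have h3 : start.toNat + (q - start.toNat) = q := by omega
    rw [h3]; exact hpre

-- the `while j < len(occ) and occ[j] < start` pointer advance
theorem pvAdvanceSpec (occ : List Int) (start : Int) :
    ∀ (fuel : Nat) (j : Nat), j ≤ occ.length → occ.length - j ≤ fuel →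
      (∀ i, i < j → occ.getD i 0 < start) →
      j ≤ pvAdvanceB occ start fuel j ∧ pvAdvanceB occ start fuel j ≤ occ.length ∧
      (∀ i, i < pvAdvanceB occ start fuel j → occ.getD i 0 < start) ∧
      (pvAdvanceB occ start fuel j < occ.length → ¬ occ.getD (pvAdvanceB occ start fuel j) 0 < start) := by
  intro fuel
  induction fuel with
  | zero =>
      intro j hj hf hinv
      have : j = occ.length := by omega
      simp only [pvAdvanceB]
      exact ⟨le_refl _, by omega, hinv, by omega⟩
  | succ f ih =>
      intro j hj hf hinv
      simp only [pvAdvanceB]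
      split
      · rename_i hcond
        have hinv2 : ∀ i, i < j + 1 → occ.getD i 0 < start := by
          intro i hi
          rcases Nat.lt_succ_iff_lt_or_eq.mp hi with h | rfl
          · exact hinv i h
          · exact hcond.2
        have := ih (j+1) (by omega) (by omega) hinv2
        exact ⟨by omega, this.2.1, this.2.2.1, this.2.2.2⟩
      · rename_i hcond
        exact ⟨le_refl _, hj, hinv, fun h1 h2 => hcond ⟨h1, h2⟩⟩

-- the sweep marks exactly the windows containing an occurrence
theorem pvSweepSpec (occ : List Int) (klen n : Int) (hsort : occ.Pairwise (· < ·)) :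
    ∀ (sc : List (Int × Int)) (j : Nat), j ≤ occ.length →
      (sc.map Prod.fst).Pairwise (· ≤ ·) →
      (∀ i, i < j → ∀ yz ∈ sc, occ.getD i 0 < max 0 (yz.1 - 500)) →
      pvSweepB occ klen n j sc = sc.map (fun yz =>
        if ∃ p ∈ occ, max 0 (yz.1 - 500) ≤ p ∧ p + klen ≤ min n (yz.1 + 500)
        then (yz.1, yz.2 + 1) else (yz.1, yz.2)) := by
  intro sc
  induction sc with
  | nil => intro j _ _ _; rfl
  | cons yz rest ih =>
      intro j hj hpair hinv
      simp only [pvSweepB]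
      set start := max 0 (yz.1 - 500) with hstart
      set j2 := pvAdvanceB occ start occ.length j with hj2
      obtain ⟨ha1, ha2, ha3, ha4⟩ := pvAdvanceSpec occ start occ.length j hj (by omega)
        (fun i hi => hinv i hi yz (List.mem_cons_self ..))
      rw [← hj2] at ha1 ha2 ha3 ha4
      have hhead : (j2 < occ.length ∧ occ.getD j2 0 + klen ≤ min n (yz.1 + 500)) ↔
          (∃ p ∈ occ, start ≤ p ∧ p + klen ≤ min n (yz.1 + 500)) := by
        constructor
        · rintro ⟨hlt, hle⟩
          refine ⟨occ.getD j2 0, ?_, ?_, hle⟩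
          · rw [List.getD_eq_getElem _ _ hlt]; exact List.getElem_mem _
          · by_contra hcon
            exact ha4 hlt (by omega)
        · rintro ⟨p, hmem, hple, hbound⟩
          obtain ⟨i, hi, rfl⟩ := List.getElem_of_mem hmem
          have hij : j2 ≤ i := by
            by_contra hcon
            have := ha3 i (by omega)
            rw [List.getD_eq_getElem _ _ hi] at this
            omega
          have hlt : j2 < occ.length := lt_of_le_of_lt hij hi
          refine ⟨hlt, ?_⟩
          have hmono : occ.getD j2 0 ≤ occ[i] := by
            rcases Nat.eq_or_lt_of_le hij with rfl | hij2
            · rw [List.getD_eq_getElem _ _ hlt]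
            · rw [List.getD_eq_getElem _ _ hlt]
              exact le_of_lt (List.pairwise_iff_getElem.mp hsort j2 i hlt hi hij2)
          omega
      rw [List.map_cons]
      congr 1
      · exact if_congr hhead rfl rfl
      · apply ih j2 ha2 (List.pairwise_cons.mp hpair).2
        intro i hi yz2 hmem2
        have hlt1 := ha3 i hi
        have hle2 : yz.1 ≤ yz2.1 :=
          (List.pairwise_cons.mp hpair).1 yz2.1 (List.mem_map_of_mem hmem2)
        have hs2 : start ≤ max 0 (yz2.1 - 500) := max_le_max le_rfl (by omega)
        exact lt_of_lt_of_le hlt1 hs2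


-- str(year) is never empty
theorem pvToCharsNeNil (y : Int) : PySem.Int.toChars y ≠ [] := by
  unfold PySem.Int.toChars
  split
  · simp
  · exact List.ne_nil_of_length_pos (Nat.length_toDigits_pos (b := 10) (n := y.toNat))

-- A's context window and per-keyword indicator / score
def pvCtx (tl : List Char) (n y : Int) : List Char :=
  PySem.List.slice tl (some (max 0 (y - 500))) (some (min n (y + 500)))

def pvInd (tl : List Char) (n : Int) (kw : String) (y : Int) : Int :=
  if PySem.Chars.isIn (PySem.Chars.lower kw.toList) (pvCtx tl n y) then 1 else 0

def pvScore (tl : List Char) (n : Int) (kws : List String) (y : Int) : Int :=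
  (kws.map (fun kw => pvInd tl n kw y)).sum

-- A's inner `sum(1 for kw in keywords if …)` foldl is the indicator sum
theorem pvScoreFoldl (tl : List Char) (n : Int) (kws : List String) (y : Int) :
    ∀ acc : Int,
      kws.foldl (fun s kw =>
        if PySem.Chars.isIn (PySem.Chars.lower kw.toList)
            (PySem.List.slice tl (some (max 0 (y - 500))) (some (min n (y + 500)))) then s + 1 else s) acc
      = acc + pvScore tl n kws y := by
  induction kws with
  | nil => intro acc; simp [pvScore]
  | cons kw kws ih =>
      intro acc
      simp only [List.foldl_cons, ih, pvScore, List.map_cons, List.sum_cons, pvInd, pvCtx]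
      split <;> ring

-- one keyword step of B's fold, on a score-labelled position list
theorem pvStepKw (tl : List Char) (n : Int) (hn : n = (tl.length : Int)) (kw : String)
    (yps : List Int) (hy0 : ∀ y ∈ yps, 0 ≤ y) (hypair : yps.Pairwise (· < ·)) (c : Int → Int) :
    (let k := PySem.Chars.lower kw.toList
     if k = [] then (yps.map (fun y => (y, c y))).map (fun p => (p.1, p.2 + 1))
     else if 1000 < k.length then (yps.map (fun y => (y, c y)))
     else
       let occ := pvScanB tl k 1 (tl.length + 1) (PySem.Chars.findFrom tl k 0 none)
       pvSweepB occ (k.length : Int) n 0 (yps.map (fun y => (y, c y))))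
    = yps.map (fun y => (y, c y + pvInd tl n kw y)) := by
  by_cases hk : PySem.Chars.lower kw.toList = []
  · simp only [hk, if_pos, List.map_map]
    apply List.map_congr_left
    intro y _
    have : PySem.Chars.isIn (PySem.Chars.lower kw.toList) (pvCtx tl n y) = true := by
      rw [PySem.Chars.isIn_iff_infix, hk]
      exact List.nil_infix
    simp [pvInd, this]
  · by_cases hklong : 1000 < (PySem.Chars.lower kw.toList).length
    · simp only [if_neg hk, if_pos hklong]
      apply List.map_congr_left
      intro y hy
      have hy0' := hy0 y hy
      have hfalse : PySem.Chars.isIn (PySem.Chars.lower kw.toList) (pvCtx tl n y) = false := by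
        rw [← Bool.not_eq_true]
        intro hc
        rw [pvCtx, pvIsInSlice (PySem.Chars.lower kw.toList) tl _ _ hk (by omega) (by rw [hn]; omega)] at hc
        obtain ⟨q, h1, h2, -⟩ := hc
        omega
      rw [pvInd, hfalse]
      simp
    · simp only [if_neg hk, if_neg hklong]
      set k := PySem.Chars.lower kw.toList with hkdef
      have hk1 : 1 ≤ (k.length : Int) := by
        have := List.length_pos_of_ne_nil hk
        omega
      have hcast0 : ((0 : Nat) : Int) = (0 : Int) := by norm_num
      obtain ⟨hsound, hsort, hcompl⟩ := pvScanSpec tl k hk 1 le_rfl hk1 (tl.length + 1) 0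
        (by omega) (by omega)
      rw [hcast0] at hsound hsort hcompl
      set occ := pvScanB tl k 1 (tl.length + 1) (PySem.Chars.findFrom tl k 0 none) with hocc
      rw [pvSweepSpec occ (k.length : Int) n hsort (yps.map (fun y => (y, c y))) 0 (by omega)
        (by simp only [List.map_map]
            have : (Prod.fst ∘ fun y => ((y : Int), c y)) = id := by funext y; rfl
            rw [this, List.map_id]
            exact hypair.imp le_of_lt)
        (by intro i hi; omega)]
      rw [List.map_map]
      apply List.map_congr_left
      intro y hy
      have hy0' := hy0 y hy
      have hcond : (∃ p ∈ occ, max 0 (y - 500) ≤ p ∧ p + (k.length : Int) ≤ min n (y + 500)) ↔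
          PySem.Chars.isIn k (pvCtx tl n y) = true := by
        rw [pvCtx, pvIsInSlice k tl _ _ hk (by omega) (by rw [hn]; omega)]
        constructor
        · rintro ⟨p, hmem, h1, h2⟩
          obtain ⟨_, hp0, hpre⟩ := hsound p hmem
          refine ⟨p.toNat, by omega, by omega, hpre⟩
        · rintro ⟨q, h1, h2, hpre⟩
          exact ⟨(q : Int), hcompl rfl q (by omega) hpre, h1, h2⟩
      simp only [Function.comp]
      rw [pvInd, ← hkdef]
      by_cases hc : PySem.Chars.isIn k (pvCtx tl n y) = true
      · rw [if_pos (hcond.mpr hc), if_pos hc]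
      · rw [if_neg (fun h => hc (hcond.mp h)), if_neg hc, add_zero]

-- B's whole keyword fold computes the indicator sums
theorem pvFoldKws (tl : List Char) (n : Int) (hn : n = (tl.length : Int))
    (yps : List Int) (hy0 : ∀ y ∈ yps, 0 ≤ y) (hypair : yps.Pairwise (· < ·)) :
    ∀ (kws : List String) (c : Int → Int),
      kws.foldl (fun sc kw =>
        let k := PySem.Chars.lower kw.toList
        if k = [] then sc.map (fun p => (p.1, p.2 + 1))
        else if 1000 < k.length then sc
        else
          let occ := pvScanB tl k 1 (tl.length + 1) (PySem.Chars.findFrom tl k 0 none)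
          pvSweepB occ (k.length : Int) n 0 sc) (yps.map (fun y => (y, c y)))
      = yps.map (fun y => (y, c y + pvScore tl n kws y)) := by
  intro kws
  induction kws with
  | nil =>
      intro c
      simp only [List.foldl_nil, pvScore, List.map_nil, List.sum_nil]
      apply List.map_congr_left; intro y _; rw [add_zero]
  | cons kw kws ih =>
      intro c
      rw [List.foldl_cons]
      have hstep := pvStepKw tl n hn kw yps hy0 hypair c
      simp only at hstep
      rw [hstep, ih (fun y => c y + pvInd tl n kw y)]
      apply List.map_congr_left
      intro y _
      simp only [pvScore, List.map_cons, List.sum_cons]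
      ring_nf

-- A's `if score > 0: append` fold is a filter of the scored map
theorem pvFoldlIf (g : Int → Int) (l : List Int) :
    ∀ acc : List (Int × Int),
      l.foldl (fun acc y => if 0 < g y then acc ++ [(y, g y)] else acc) acc
      = acc ++ (l.map (fun y => (y, g y))).filter (fun p => 0 < p.2) := by
  induction l with
  | nil => intro acc; simp
  | cons x l ih =>
      intro acc
      simp only [List.foldl_cons, List.map_cons, List.filter_cons]
      by_cases h : 0 < g x
      · simp [h, ih]
      · simp [h, ih]

-- ===== VERDICT (by name: the statement is the Claim_ definition above) =====
theorem select_chunks_spec : Claim_equal_select_chunks := by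
  intro text keywords year max_chunks chunk_size _
  unfold Spec_select_chunks select_chunks select_chunks_alt
  simp only []
  rw [pvYearAB]
  set tl := PySem.Chars.lower text.toList with htl
  set ys := PySem.Int.toChars year with hys
  set n := PySem.Str.len text with hnd
  have hlen : tl.length = text.toList.length := by rw [htl]; simp [PySem.Chars.lower]
  have hn : n = (tl.length : Int) := by rw [hnd, PySem.Str.len_eq, hlen]
  have hysne : ys ≠ [] := pvToCharsNeNil year
  have hys1 : 1 ≤ (ys.length : Int) := by
    have := List.length_pos_of_ne_nil hysne
    omega
  have hcast0 : ((0 : Nat) : Int) = (0 : Int) := by norm_num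
  obtain ⟨hsound, hpair, -⟩ := pvScanSpec tl ys hysne (ys.length : Int) hys1 le_rfl
    (tl.length + 1) 0 (by omega) (by omega)
  rw [hcast0] at hsound hpair
  set yps := pvScanB tl ys (ys.length : Int) (tl.length + 1) (PySem.Chars.findFrom tl ys 0 none) with hyps
  have hy0 : ∀ y ∈ yps, 0 ≤ y := fun y hy => (hsound y hy).2.1
  by_cases hempty : yps = []
  · rw [if_pos hempty, hempty]
    simp [PySem.List.sorted, PySem.List.slice]
  · rw [if_neg hempty]
    -- A's scored fold = filter of the scored map
    rw [pvFoldlIf (fun y => keywords.foldl (fun s kw =>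
        if PySem.Chars.isIn (PySem.Chars.lower kw.toList)
          (PySem.List.slice tl (some (max 0 (y - 500))) (some (min n (y + 500)))) then s + 1 else s) 0) yps []]
    have hA : (fun y => (y, keywords.foldl (fun s kw =>
        if PySem.Chars.isIn (PySem.Chars.lower kw.toList)
          (PySem.List.slice tl (some (max 0 (y - 500))) (some (min n (y + 500)))) then s + 1 else s) 0))
        = (fun y => (y, pvScore tl n keywords y)) := by
      funext y
      rw [pvScoreFoldl tl n keywords y 0, zero_add]
    rw [hA]
    -- B's keyword fold = the same scored map
    have hB := pvFoldKws tl n hn yps hy0 hpair keywords (fun _ => (0 : Int))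
    simp only [] at hB
    rw [hB]
    have hB2 : (fun y => ((y : Int), 0 + pvScore tl n keywords y)) = (fun y => (y, pvScore tl n keywords y)) := by
      funext y; rw [zero_add]
    rw [hB2]
    -- identical tails: sort, slice, chunk extraction
    rw [PySem.List.foldl_append_singleton_eq_map]
    simp only [List.nil_append]
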